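-- pv_equiv track=rewrite | github.com/AnashiKitsun/AdventOfCode | days/6/CustomCustoms.py | getAgreed
-- ===== SOURCE A (Python) =====
-- def getAgreed(form):
--     count = 0
--     for char in form[0]:
--         isAll = True
--         for submission in form[1:]:
--             if not(char in submission):
--                 isAll = False
--         count += isAll
--     return count
-- ===== SOURCE B (Python) =====
-- def getAgreed(form):
--     head = form[0]
--     if len(form) == 1:
--         return len(head)
--     common = set(form[1])
--     prev = form[1]
--     for submission in form[2:]:
--         if submission == prev:
--             continue
--         if not common:
--             break
--         common.intersection_update(submission)
--         prev = submission
--     return sum(head.count(c) for c in common)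
-- ===== Notes on version B (the rewrite author's own statement) =====
-- stated objective: faster
-- what changed: B intersects the submissions' character sets in a single pass (skipping adjacent duplicate submissions and breaking out once the intersection is empty) and then counts form[0]'s characters via str.count per surviving character, instead of A's rescanning every submission (rebuilding form[1:] each time) for every character of form[0].
-- outside the precondition, e.g. on getAgreed([]): A raises IndexError, B raises IndexError
import Mathlib
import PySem

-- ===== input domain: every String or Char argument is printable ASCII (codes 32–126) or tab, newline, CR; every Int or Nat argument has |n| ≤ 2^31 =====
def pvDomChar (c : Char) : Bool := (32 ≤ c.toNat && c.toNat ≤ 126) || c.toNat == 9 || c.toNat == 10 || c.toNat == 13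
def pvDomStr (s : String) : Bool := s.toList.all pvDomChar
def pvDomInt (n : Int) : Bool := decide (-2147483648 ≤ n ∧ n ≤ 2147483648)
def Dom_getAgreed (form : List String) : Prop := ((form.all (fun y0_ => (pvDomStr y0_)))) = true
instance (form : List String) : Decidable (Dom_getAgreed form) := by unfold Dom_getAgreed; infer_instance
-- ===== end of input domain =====

-- B dedups the submissions, intersects their character sets once (early exit on empty),
-- and counts form[0]'s characters per surviving character, instead of A's rescan of every
-- submission for every character of form[0] (objective: faster).


-- ===== PORT A =====
-- 'char in submission' for a single character is exactly element membership in the string.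
def getAgreed (form : List String) : Int :=
  ((PySem.List.pyGet? form 0).getD "").toList.foldl  -- form[0]; Pre_ excludes the empty list
    (fun count char =>
      count +
        (if (PySem.List.slice form (some 1) none).foldl  -- form[1:]
              (fun isAll submission =>
                if !(submission.toList.contains char) then false else isAll) true
         then 1 else 0))
    0

-- ===== PORT B =====
-- the for-loop over form[2:]: adjacent duplicates are skipped ('submission == prev'),
-- 'if not common: break' is the early exit, and 'common.intersection_update(submission)'
-- intersects with the submission's characters.
def interLoop (common : PySem.Set Char) (prev : String) (subs : List String) : PySem.Set Char :=
  match subs with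
  | [] => common
  | submission :: rest =>
    if submission == prev then interLoop common prev rest
    else if PySem.Set.len common = 0 then common
    else interLoop (PySem.Set.inter common submission.toList) submission rest

def getAgreed_alt (form : List String) : Int :=
  let head := ((PySem.List.pyGet? form 0).getD "").toList        -- head = form[0]; Pre_ excludes []
  if form.length = 1 then (head.length : Int)
  else
    let s1 := (PySem.List.pyGet? form 1).getD ""                 -- form[1]
    let common := interLoop (PySem.Set.ofList s1.toList) s1 (PySem.List.slice form (some 2) none)
    (common.map (fun c => (head.count c : Int))).sum             -- sum(head.count(c) for c in common)

-- ===== PRECONDITION & SPEC =====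
-- A (and B) raise IndexError on form = [] (form[0]); that is all Pre_ excludes.
def Pre_getAgreed (form : List String) : Prop := form ≠ []
instance (form : List String) : Decidable (Pre_getAgreed form) := by unfold Pre_getAgreed; infer_instance
def pvWitness_getAgreed : List String := ["abc", "ab", "cab"]

def Spec_getAgreed (form : List String) (out : Int) : Prop := out = getAgreed_alt form
instance (form : List String) (out : Int) : Decidable (Spec_getAgreed form out) := by unfold Spec_getAgreed; infer_instance

-- ===== CLAIM (what is proved, stated in full; the proofs are below) =====
def Claim_equal_getAgreed : Prop := ∀ (form : List String), Dom_getAgreed form → Pre_getAgreed form → Spec_getAgreed form (getAgreed form)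

-- ===== LEMMAS AND PROOFS =====

-- A's inner loop is a running 'and' of memberships.
lemma innerA_eq_all (rest : List String) (char : Char) (b : Bool) :
    rest.foldl (fun isAll submission =>
        if !(submission.toList.contains char) then false else isAll) b
      = (b && rest.all (fun s => s.toList.contains char)) := by
  induction rest generalizing b with
  | nil => simp
  | cons s rs ih =>
    simp only [List.foldl_cons, List.all_cons]
    rw [ih]
    cases h : s.toList.contains char <;> simp

-- skipping an adjacent duplicate is sound because common ⊆ prev's characters,
-- and the early 'break' on an empty common does not change membership.
lemma mem_interLoop (subs : List String) (c : PySem.Set Char) (prev : String)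
    (hinv : ∀ x ∈ c, x ∈ prev.toList) (ch : Char) :
    ch ∈ interLoop c prev subs ↔ ch ∈ c ∧ ∀ s ∈ subs, s.toList.contains ch := by
  induction subs generalizing c prev with
  | nil => simp [interLoop]
  | cons s rs ih =>
    unfold interLoop
    by_cases heq : s = prev
    · subst heq
      rw [if_pos (by simp), ih c s hinv]
      constructor
      · rintro ⟨h1, h2⟩
        refine ⟨h1, ?_⟩
        intro t ht
        rcases List.mem_cons.mp ht with h | h
        · subst h; simpa [List.contains_iff_mem] using hinv ch h1
        · exact h2 t h
      · rintro ⟨h1, h2⟩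
        exact ⟨h1, fun t ht => h2 t (List.mem_cons_of_mem _ ht)⟩
    · rw [if_neg (by simpa using heq)]
      by_cases h : PySem.Set.len c = 0
      · have hc : c = [] := by simpa [PySem.Set.len] using h
        subst hc
        rw [if_pos h]
        simp [List.not_mem_nil]
      · rw [if_neg h, ih (PySem.Set.inter c s.toList) s
            (fun x hx => ((PySem.Set.mem_inter c s.toList x).mp hx).2)]
        simp [PySem.Set.mem_inter c s.toList, and_assoc]

lemma nodup_interLoop (subs : List String) (c : PySem.Set Char) (prev : String) (h : c.Nodup) :
    (interLoop c prev subs).Nodup := by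
  induction subs generalizing c prev with
  | nil => exact h
  | cons s rs ih =>
    unfold interLoop
    split
    · exact ih _ _ h
    · split
      · exact h
      · exact ih _ _ (PySem.Set.nodup_inter c s.toList h)

lemma foldl_count_all (l : List Char) (n : Int) :
    l.foldl (fun n (_ : Char) => n + 1) n = n + l.length := by
  induction l generalizing n with
  | nil => simp
  | cons c cs ih => rw [List.foldl_cons, ih]; simp [List.length_cons]; omega

-- splitting countP over membership in c :: S when c ∉ S
lemma countP_mem_cons (l : List Char) (c : Char) (S : List Char) (hc : c ∉ S) :
    l.countP (fun x => decide (x ∈ (c :: S)))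
      = l.count c + l.countP (fun x => decide (x ∈ S)) := by
  induction l with
  | nil => simp
  | cons x xs ih =>
    rw [List.count_cons, List.countP_cons, List.countP_cons, ih]
    by_cases hx : x = c
    · subst hx
      have hxS : x ∉ S := hc
      simp [hxS]
      omega
    · simp [List.mem_cons, hx]
      split <;> omega

-- a sum of per-character counts over a duplicate-free set IS a countP by membership
lemma sum_count_nodup (S : List Char) (l : List Char) (h : S.Nodup) :
    ((S.map fun c => ((l.count c : Nat) : Int)).sum)
      = (l.countP (fun x => decide (x ∈ S)) : Int) := by
  induction S with
  | nil => simp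
  | cons c S' ih =>
    have hnd := List.nodup_cons.mp h
    rw [List.map_cons, List.sum_cons, ih hnd.2, countP_mem_cons l c S' hnd.1]
    push_cast
    ring

-- ===== VERDICT (by name: the statement is the Claim_ definition above) =====
theorem getAgreed_spec : Claim_equal_getAgreed := by
  intro form _ hpre
  obtain ⟨f0, rest, rfl⟩ : ∃ f0 rest, form = f0 :: rest := by
    cases form with
    | nil => exact absurd rfl hpre
    | cons a l => exact ⟨a, l, rfl⟩
  unfold Spec_getAgreed getAgreed getAgreed_alt
  simp only [PySem.List.slice_from_one, List.tail_cons]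
  have hget : (PySem.List.pyGet? (f0 :: rest) 0).getD "" = f0 := by
    simp [PySem.List.pyGet?, PySem.List.pyIdx?]
  rw [hget]
  cases rest with
  | nil =>
    simp only [List.length_cons, List.length_nil, List.foldl_nil]
    simpa using foldl_count_all f0.toList 0
  | cons s1 rs =>
    have hlen : ¬ ((f0 :: s1 :: rs).length = 1) := by simp
    rw [if_neg hlen]
    have hget1 : (PySem.List.pyGet? (f0 :: s1 :: rs) 1).getD "" = s1 := by
      simp [PySem.List.pyGet?, PySem.List.pyIdx?]
    rw [hget1]
    have hdrop : PySem.List.slice (f0 :: s1 :: rs) (some 2) none = rs := by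
      have := PySem.List.slice_from_natCast (f0 :: s1 :: rs) 2
      simpa using this
    rw [hdrop]
    set common := interLoop (PySem.Set.ofList s1.toList) s1 rs with hcommon
    -- the A-side fold is a countP
    have hA : f0.toList.foldl
        (fun count char =>
          count + (if (s1 :: rs).foldl (fun isAll submission =>
              if !(submission.toList.contains char) then false else isAll) true
            then 1 else 0)) 0
        = (f0.toList.countP
            (fun char => (s1 :: rs).all fun s => s.toList.contains char) : Int) := by
      have hfun : (fun (count : Int) char =>
          count + (if (s1 :: rs).foldl (fun isAll submission =>
              if !(submission.toList.contains char) then false else isAll) true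
            then 1 else 0))
          = (fun (acc : Int) char =>
              if ((s1 :: rs).all fun s => s.toList.contains char) then acc + 1 else acc) := by
        funext count char
        rw [innerA_eq_all (s1 :: rs) char true, Bool.true_and]
        split <;> omega
      rw [hfun, PySem.List.foldl_count_if]
      simp
    rw [hA]
    -- the B-side sum is the same countP
    have hnd : common.Nodup :=
      nodup_interLoop rs _ s1 (PySem.Set.nodup_ofList s1.toList)
    rw [sum_count_nodup common f0.toList hnd]
    congr 1
    apply List.countP_congr
    intro char _
    rw [decide_eq_true_iff, hcommon,
      mem_interLoop rs _ s1 (fun x hx => (PySem.Set.mem_ofList s1.toList x).mp hx)]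
    simp [PySem.Set.mem_ofList, List.all_cons, List.all_eq_true]
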